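-- pv_equiv track=rewrite | github.com/choruzo/Control_financiero | backend/app/services/analytics.py | _months_window
-- ===== SOURCE A (Python) =====
-- def _months_window(year: int, month: int, n: int) -> list[tuple[int, int]]:
--     """Return list of (year, month) for the N months ending at (year, month), oldest first."""
--     months: list[tuple[int, int]] = []
--     y, m = year, month
--     for _ in range(n):
--         months.append((y, m))
--         m -= 1
--         if m == 0:
--             m = 12
--             y -= 1
--     return list(reversed(months))
-- ===== SOURCE B (Python) =====
-- def _months_window(year: int, month: int, n: int) -> list[tuple[int, int]]:
--     """Return list of (year, month) for the N months ending at (year, month), oldest first."""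
--     end = year * 12 + month - 1  # absolute month index of the last month
--     return [(t // 12, t % 12 + 1) for t in range(end - n + 1, end + 1)]
-- ===== Notes on version B (the rewrite author's own statement) =====
-- stated objective: simpler
-- what changed: B maps divmod over a single range of absolute month indices (year*12+month-1), producing the window oldest-first in one comprehension with no mutable state, no rollover branch and no reversal; Pre_ admits calendar months 1..12 (plus any empty window n<=0), excluding months outside 1..12 with n>0, the function's unnatural domain where A's decrement-without-wrap values are accidental.
-- outside the precondition, e.g. on _months_window(2024, 0, 2): A returns [(2024, -1), (2024, 0)], B returns [(2023, 11), (2023, 12)]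
import Mathlib
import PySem

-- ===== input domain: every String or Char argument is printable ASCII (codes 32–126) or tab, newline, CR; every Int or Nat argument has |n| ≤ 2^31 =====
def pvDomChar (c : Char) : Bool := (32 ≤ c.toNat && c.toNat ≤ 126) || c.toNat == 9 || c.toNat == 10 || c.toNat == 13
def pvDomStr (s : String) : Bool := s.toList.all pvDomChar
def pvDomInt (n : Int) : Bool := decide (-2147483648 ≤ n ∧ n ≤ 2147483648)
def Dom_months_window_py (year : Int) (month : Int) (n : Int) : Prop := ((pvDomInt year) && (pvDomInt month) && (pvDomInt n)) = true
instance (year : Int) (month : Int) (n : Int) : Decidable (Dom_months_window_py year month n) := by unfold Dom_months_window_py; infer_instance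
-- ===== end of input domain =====

-- B maps divmod over one range of absolute month indices (oldest-first, no wrap branch,
-- no reversal), on the calendar domain 1 ≤ month ≤ 12 (simpler, same cost).

-- ===== PORT A =====
def months_window_py (year : Int) (month : Int) (n : Int) : List (Int × Int) :=
  let s := (PySem.List.pyRange 0 n 1).foldl
    (fun (s : List (Int × Int) × Int × Int) _ =>
      let months := s.1 ++ [(s.2.1, s.2.2)]
      let m := s.2.2 - 1
      if m = 0 then (months, s.2.1 - 1, 12) else (months, s.2.1, m))
    ([], year, month)
  s.1.reverse

-- ===== PORT B =====
def months_window_py_alt (year : Int) (month : Int) (n : Int) : List (Int × Int) :=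
  let e := year * 12 + month - 1
  (PySem.List.pyRange (e - n + 1) (e + 1) 1).map
    (fun t => (PySem.Int.floordiv t 12, PySem.Int.mod t 12 + 1))

-- ===== PRECONDITION & SPEC =====
-- Pre_ admits calendar months 1..12 (the function's natural domain) plus any empty window
-- (n ≤ 0, where both return []): for a month outside 1..12 with n > 0 A still returns, but
-- its no-rollover decrement values there are an accident of the implementation
-- (excluded example in the header of this document).
def Pre_months_window_py (year : Int) (month : Int) (n : Int) : Prop := (1 ≤ month ∧ month ≤ 12) ∨ n ≤ 0
instance (year : Int) (month : Int) (n : Int) : Decidable (Pre_months_window_py year month n) := by unfold Pre_months_window_py; infer_instance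
def pvWitness_months_window_py : Int × Int × Int := (2024, 5, 3)
def Spec_months_window_py (year : Int) (month : Int) (n : Int) (out : List (Int × Int)) : Prop := out = months_window_py_alt year month n
instance (year : Int) (month : Int) (n : Int) (out : List (Int × Int)) : Decidable (Spec_months_window_py year month n out) := by unfold Spec_months_window_py; infer_instance

-- ===== CLAIM =====
def Claim_equal_months_window_py : Prop := ∀ (year : Int) (month : Int) (n : Int), Dom_months_window_py year month n → Pre_months_window_py year month n → Spec_months_window_py year month n (months_window_py year month n)

-- ===== LEMMAS AND PROOFS =====

-- the loop body of A, as a pure step on the (year, month) state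
def pvStep (s : Int × Int) : Int × Int :=
  if s.2 - 1 = 0 then (s.1 - 1, 12) else (s.1, s.2 - 1)

-- on calendar months, k backward steps land on absolute month index year*12+month-1-k
lemma pvStep_iterate (year month : Int) (h1 : 1 ≤ month) (h2 : month ≤ 12) : ∀ (k : Nat),
    pvStep^[k] (year, month)
      = ((year * 12 + month - 1 - k) / 12, (year * 12 + month - 1 - k) % 12 + 1) := by
  intro k
  induction k with
  | zero =>
      simp only [Function.iterate_zero, id_eq, Nat.cast_zero, sub_zero, Prod.mk.injEq]
      omega
  | succ k ih =>
      rw [Function.iterate_succ_apply', ih]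
      simp only [pvStep]
      push_cast
      split_ifs <;> simp only [Prod.mk.injEq] <;> omega

-- A's fold, with the state expressed through pvStep and the list accumulated as iterates
lemma pvFoldA : ∀ (l : List Int) (acc : List (Int × Int)) (s : Int × Int),
    l.foldl (fun (s : List (Int × Int) × Int × Int) _ =>
      let months := s.1 ++ [(s.2.1, s.2.2)]
      let m := s.2.2 - 1
      if m = 0 then (months, s.2.1 - 1, 12) else (months, s.2.1, m)) (acc, s)
    = (acc ++ (List.range l.length).map (fun j => pvStep^[j] s), pvStep^[l.length] s) := by
  intro l
  induction l with
  | nil => intro acc s; simp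
  | cons x xs ih =>
      intro acc s
      obtain ⟨sy, sm⟩ := s
      simp only [List.foldl_cons, List.length_cons]
      have hbody : (if sm - 1 = 0 then (acc ++ [(sy, sm)], sy - 1, (12:Int))
                    else (acc ++ [(sy, sm)], sy, sm - 1))
          = ((acc ++ [(sy, sm)] : List (Int × Int)), pvStep (sy, sm)) := by
        simp only [pvStep]
        split_ifs <;> rfl
      rw [hbody, ih]
      refine Prod.ext ?_ ?_
      · simp only [List.append_assoc, List.singleton_append]
        congr 1
        rw [List.range_succ_eq_map]
        simp [Function.comp_def, Function.iterate_succ_apply]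
      · simp [Function.iterate_succ_apply]

-- ===== VERDICT =====
theorem months_window_py_spec : Claim_equal_months_window_py := by
  intro year month n _ hpre
  rcases hpre with ⟨h1, h2⟩ | hn
  case inr =>
    unfold Spec_months_window_py months_window_py months_window_py_alt
    rw [PySem.List.pyRange_one_eq_nil (show (n:Int) ≤ 0 from hn)]
    simp [PySem.List.pyRange_one_eq_nil
      (show year * 12 + month ≤ year * 12 + month - 1 - n + 1 by omega)]
  unfold Spec_months_window_py
  unfold months_window_py months_window_py_alt
  rw [pvFoldA (PySem.List.pyRange 0 n 1) [] (year, month)]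
  simp only [List.nil_append, PySem.List.pyRange_one,
    PySem.Int.floordiv_eq_ediv_of_pos (show (0:Int) < 12 by norm_num),
    PySem.Int.mod_eq_emod_of_pos (show (0:Int) < 12 by norm_num)]
  apply List.ext_getElem
  · simp only [List.length_reverse, List.length_map, List.length_range]
    omega
  · intro i hi1 hi2
    simp only [List.length_reverse, List.length_map, List.length_range] at hi1 hi2
    simp only [List.getElem_reverse, List.getElem_map, List.getElem_range,
      List.length_map, List.length_range, pvStep_iterate year month h1 h2]
    have harg : year * 12 + month - 1 - ((((n - 0).toNat - 1 - i : ℕ)) : ℤ)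
        = year * 12 + month - 1 - n + 1 + (i : ℤ) := by omega
    rw [harg]
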